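-- pv_equiv track=rewrite | github.com/JorrisEkoloko/sc-bot | define/crypto-intelligence/utils/chain_mapping.py | get_all_chain_aliases
-- ===== SOURCE A (Python) =====
-- CHAIN_MAPPINGS = {
--     'defillama': {
--         'evm': 'ethereum',
--         'ethereum': 'ethereum',
--         'eth': 'ethereum',
--         'solana': 'solana',
--         'sol': 'solana',
--         'bsc': 'bsc',
--         'bnb': 'bsc',
--         'polygon': 'polygon',
--         'matic': 'polygon',
--         'arbitrum': 'arbitrum',
--         'optimism': 'optimism',
--         'base': 'base',
--         'avalanche': 'avax',
--         'avax': 'avax'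
--     },
--     'dexscreener': {
--         'evm': 'ethereum',
--         'eth': 'ethereum',
--         'ethereum': 'ethereum',
--         'bnb': 'bsc',
--         'bsc': 'bsc',
--         'matic': 'polygon',
--         'polygon': 'polygon',
--         'avax': 'avalanche',
--         'avalanche': 'avalanche',
--         'ftm': 'fantom',
--         'fantom': 'fantom',
--         'op': 'optimism',
--         'optimism': 'optimism',
--         'arbitrum': 'arbitrum',
--         'base': 'base',
--         'solana': 'solana',
--         'sol': 'solana'
--     },
--     'coinmarketcap': {
--         'ethereum': 1,
--         'evm': 1,
--         'eth': 1,
--         'bsc': 56,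
--         'bnb': 56,
--         'polygon': 137,
--         'matic': 137,
--         'avalanche': 43114,
--         'avax': 43114
--     }
-- }
--
-- def get_all_chain_aliases(chain: str) -> list:
--     """
--     Get all known aliases for a chain.
--
--     Args:
--         chain: Chain name
--
--     Returns:
--         List of all known aliases for this chain
--
--     Example:
--         >>> get_all_chain_aliases('ethereum')
--         ['ethereum', 'evm', 'eth']
--     """
--     chain_lower = chain.lower()
--     aliases = set([chain_lower])
--
--     # Find all keys that map to the same value
--     for api_mappings in CHAIN_MAPPINGS.values():
--         target_value = api_mappings.get(chain_lower)
--         if target_value: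
--             for key, value in api_mappings.items():
--                 if value == target_value:
--                     aliases.add(key)
--
--     return sorted(list(aliases))
-- ===== SOURCE B (Python) =====
-- CHAIN_MAPPINGS = {
--     'defillama': {
--         'evm': 'ethereum', 'ethereum': 'ethereum', 'eth': 'ethereum',
--         'solana': 'solana', 'sol': 'solana',
--         'bsc': 'bsc', 'bnb': 'bsc',
--         'polygon': 'polygon', 'matic': 'polygon',
--         'arbitrum': 'arbitrum', 'optimism': 'optimism', 'base': 'base',
--         'avalanche': 'avax', 'avax': 'avax'
--     },
--     'dexscreener': {
--         'evm': 'ethereum', 'eth': 'ethereum', 'ethereum': 'ethereum',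
--         'bnb': 'bsc', 'bsc': 'bsc',
--         'matic': 'polygon', 'polygon': 'polygon',
--         'avax': 'avalanche', 'avalanche': 'avalanche',
--         'ftm': 'fantom', 'fantom': 'fantom',
--         'op': 'optimism', 'optimism': 'optimism',
--         'arbitrum': 'arbitrum', 'base': 'base',
--         'solana': 'solana', 'sol': 'solana'
--     },
--     'coinmarketcap': {
--         'ethereum': 1, 'evm': 1, 'eth': 1,
--         'bsc': 56, 'bnb': 56,
--         'polygon': 137, 'matic': 137,
--         'avalanche': 43114, 'avax': 43114
--     }
-- }
--
-- # Reverse index built once at import time: for each API mapping, a dict from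
-- # target value to the list of alias keys mapping to it.
-- _ALIAS_GROUPS = []
-- for _api in CHAIN_MAPPINGS.values():
--     _idx = {}
--     for _k, _v in _api.items():
--         _idx.setdefault(_v, []).append(_k)
--     _ALIAS_GROUPS.append((_api, _idx))
--
--
-- def get_all_chain_aliases(chain: str) -> list:
--     """Get all known aliases for a chain (precomputed reverse-index lookup)."""
--     chain_lower = chain.lower()
--     aliases = {chain_lower}
--     for api, idx in _ALIAS_GROUPS:
--         if chain_lower in api:
--             aliases.update(idx[api[chain_lower]])
--     return sorted(aliases)
-- ===== Notes on version B (the rewrite author's own statement) =====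
-- stated objective: alternative
-- what changed: B precomputes, once per API mapping, a reverse index from target value to its list of alias keys, so each call does one dict lookup and one group union per mapping instead of A's inner scan over all of the mapping's items.
import Mathlib
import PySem

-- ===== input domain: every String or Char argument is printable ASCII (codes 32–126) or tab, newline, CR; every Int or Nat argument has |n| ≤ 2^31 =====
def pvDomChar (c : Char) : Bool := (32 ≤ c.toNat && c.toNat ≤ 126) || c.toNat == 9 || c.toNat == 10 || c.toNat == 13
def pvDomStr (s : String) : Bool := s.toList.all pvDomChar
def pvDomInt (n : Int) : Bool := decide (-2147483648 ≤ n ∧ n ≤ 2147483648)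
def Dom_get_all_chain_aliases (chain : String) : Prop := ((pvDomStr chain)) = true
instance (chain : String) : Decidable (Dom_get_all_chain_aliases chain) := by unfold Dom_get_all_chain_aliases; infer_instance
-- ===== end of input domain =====

-- B replaces A's inner scan over each mapping's items by a module-level reverse index
-- (value -> list of alias keys) looked up once per mapping: an alternative index-based decomposition.


-- ===== PORT A =====
-- CHAIN_MAPPINGS, one Dict per API (coinmarketcap has Int values, so it is its own constant)
def pvDefillama : PySem.Dict String String := PySem.Dict.ofList
  [("evm","ethereum"),("ethereum","ethereum"),("eth","ethereum"),("solana","solana"),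
   ("sol","solana"),("bsc","bsc"),("bnb","bsc"),("polygon","polygon"),("matic","polygon"),
   ("arbitrum","arbitrum"),("optimism","optimism"),("base","base"),("avalanche","avax"),
   ("avax","avax")]
def pvDexscreener : PySem.Dict String String := PySem.Dict.ofList
  [("evm","ethereum"),("eth","ethereum"),("ethereum","ethereum"),("bnb","bsc"),("bsc","bsc"),
   ("matic","polygon"),("polygon","polygon"),("avax","avalanche"),("avalanche","avalanche"),
   ("ftm","fantom"),("fantom","fantom"),("op","optimism"),("optimism","optimism"),
   ("arbitrum","arbitrum"),("base","base"),("solana","solana"),("sol","solana")]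
def pvCoinmarketcap : PySem.Dict String Int := PySem.Dict.ofList
  [("ethereum",1),("evm",1),("eth",1),("bsc",56),("bnb",56),("polygon",137),("matic",137),
   ("avalanche",43114),("avax",43114)]

-- sorted(list(aliases)): Python's plain string order is code-point lexicographic, which is the
-- lexicographic order on toList; Lean's String `<` is not kernel-reducible, so the sort keys on toList.
-- the body of A after `chain_lower = chain.lower()`: one iteration of A's outer loop per mapping,
-- each with A's inner scan `for key, value in api_mappings.items(): if value == target_value: aliases.add(key)`
def pvACore (cl : String) : List String :=
  let aliases : PySem.Set String := PySem.Set.ofList [cl]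
  let aliases :=
    match PySem.Dict.get? pvDefillama cl with
    | some tv => if tv ≠ "" then
        pvDefillama.items.foldl (fun s kv => if kv.2 == tv then PySem.Set.add s kv.1 else s) aliases
      else aliases
    | none => aliases
  let aliases :=
    match PySem.Dict.get? pvDexscreener cl with
    | some tv => if tv ≠ "" then
        pvDexscreener.items.foldl (fun s kv => if kv.2 == tv then PySem.Set.add s kv.1 else s) aliases
      else aliases
    | none => aliases
  let aliases :=
    match PySem.Dict.get? pvCoinmarketcap cl with
    | some tv => if tv ≠ 0 then
        pvCoinmarketcap.items.foldl (fun s kv => if kv.2 == tv then PySem.Set.add s kv.1 else s) aliases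
      else aliases
    | none => aliases
  PySem.List.sorted aliases (fun x => x.toList) false

def get_all_chain_aliases (chain : String) : List String :=
  pvACore (PySem.Str.lower chain)

-- ===== PORT B =====
-- module-level reverse indexes: for each mapping, value -> list of alias keys
-- (the `idx.setdefault(v, []).append(k)` build loop, i.e. Dict.modify v [] (· ++ [k]))
def pvIdxDefillama : PySem.Dict String (List String) :=
  pvDefillama.items.foldl (fun d kv => PySem.Dict.modify d kv.2 [] (· ++ [kv.1])) PySem.Dict.empty
def pvIdxDexscreener : PySem.Dict String (List String) :=
  pvDexscreener.items.foldl (fun d kv => PySem.Dict.modify d kv.2 [] (· ++ [kv.1])) PySem.Dict.empty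
def pvIdxCoinmarketcap : PySem.Dict Int (List String) :=
  pvCoinmarketcap.items.foldl (fun d kv => PySem.Dict.modify d kv.2 [] (· ++ [kv.1])) PySem.Dict.empty

-- the body of B after `chain_lower = chain.lower()`: `if cl in api: aliases.update(idx[api[cl]])`
def pvBCore (cl : String) : List String :=
  let aliases : PySem.Set String := PySem.Set.ofList [cl]
  let aliases :=
    match PySem.Dict.get? pvDefillama cl with
    | some tv => PySem.Set.update aliases (pvIdxDefillama.getD tv [])
    | none => aliases
  let aliases :=
    match PySem.Dict.get? pvDexscreener cl with
    | some tv => PySem.Set.update aliases (pvIdxDexscreener.getD tv [])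
    | none => aliases
  let aliases :=
    match PySem.Dict.get? pvCoinmarketcap cl with
    | some tv => PySem.Set.update aliases (pvIdxCoinmarketcap.getD tv [])
    | none => aliases
  PySem.List.sorted aliases (fun x => x.toList) false

def get_all_chain_aliases_alt (chain : String) : List String :=
  pvBCore (PySem.Str.lower chain)

-- ===== PRECONDITION & SPEC =====
def Spec_get_all_chain_aliases (chain : String) (out : List String) : Prop := out = get_all_chain_aliases_alt chain
instance (chain : String) (out : List String) : Decidable (Spec_get_all_chain_aliases chain out) := by unfold Spec_get_all_chain_aliases; infer_instance

-- ===== CLAIM (what is proved, stated in full; the proofs are below) =====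
def Claim_equal_get_all_chain_aliases : Prop := ∀ (chain : String), Dom_get_all_chain_aliases chain → Spec_get_all_chain_aliases chain (get_all_chain_aliases chain)

-- ===== LEMMAS AND PROOFS =====

-- all keys occurring in any mapping
def pvAllKeys : List String :=
  ["evm","ethereum","eth","solana","sol","bsc","bnb","polygon","matic",
   "arbitrum","optimism","base","avalanche","avax","ftm","fantom","op"]

lemma pvACore_eq_pvBCore (cl : String) : pvACore cl = pvBCore cl := by
  by_cases h : cl ∈ pvAllKeys
  · simp only [pvAllKeys, List.mem_cons, List.not_mem_nil, or_false] at h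
    rcases h with h|h|h|h|h|h|h|h|h|h|h|h|h|h|h|h|h <;> subst h <;> decide
  · have hdl : PySem.Dict.get? pvDefillama cl = none := by
      rw [PySem.Dict.get?_eq_none_iff_not_mem_keys]
      intro hk
      apply h
      have : pvDefillama.keys = ["evm","ethereum","eth","solana","sol","bsc","bnb","polygon",
        "matic","arbitrum","optimism","base","avalanche","avax"] := by decide
      rw [this] at hk
      simp only [pvAllKeys, List.mem_cons, List.not_mem_nil, or_false] at hk ⊢
      tauto
    have hds : PySem.Dict.get? pvDexscreener cl = none := by
      rw [PySem.Dict.get?_eq_none_iff_not_mem_keys]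
      intro hk
      apply h
      have : pvDexscreener.keys = ["evm","eth","ethereum","bnb","bsc","matic","polygon",
        "avax","avalanche","ftm","fantom","op","optimism","arbitrum","base","solana","sol"] := by decide
      rw [this] at hk
      simp only [pvAllKeys, List.mem_cons, List.not_mem_nil, or_false] at hk ⊢
      tauto
    have hcmc : PySem.Dict.get? pvCoinmarketcap cl = none := by
      rw [PySem.Dict.get?_eq_none_iff_not_mem_keys]
      intro hk
      apply h
      have : pvCoinmarketcap.keys = ["ethereum","evm","eth","bsc","bnb","polygon","matic",
        "avalanche","avax"] := by decide
      rw [this] at hk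
      simp only [pvAllKeys, List.mem_cons, List.not_mem_nil, or_false] at hk ⊢
      tauto
    simp only [pvACore, pvBCore, hdl, hds, hcmc]

-- ===== VERDICT (by name: the statement is the Claim_ definition above) =====
theorem get_all_chain_aliases_spec : Claim_equal_get_all_chain_aliases := by
  intro chain _
  show get_all_chain_aliases chain = get_all_chain_aliases_alt chain
  simp only [get_all_chain_aliases, get_all_chain_aliases_alt, pvACore_eq_pvBCore]
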